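-- pv_equiv track=rewrite | github.com/twpca/toi-primary-2024 | generator/steps_2.py | generate_fixed_k
-- ===== SOURCE A (Python) =====
-- def generate_fixed_k(k: int, limit_e: int):
--     step = set()
--
--     cur = 0
--     for i in range(1, k):
--         cur += i
--         step.add(cur)
--         if i != k - 1:
--             cur += k
--         step.add(cur)
--
--     hole = []
--     for i in range(1, cur):
--         if i not in step:
--             hole.append(i)
--
--     if (cur - len(hole)) * len(step) > limit_e:
--         return None
--
--     return cur, step, hole
-- ===== SOURCE B (Python) =====
-- def generate_fixed_k(k, limit_e):
--     # Closed-form construction: the i-th iteration contributes the breakpoints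
--     # t(i) + (i-1)*k and (except for the last one) t(i) + i*k, where t(i) is the
--     # i-th triangular number; holes are emitted as the ranges between consecutive
--     # breakpoints, with no running accumulator and no per-integer membership test.
--     bps = []
--     for i in range(1, k):
--         a = i * (i + 1) // 2 + (i - 1) * k
--         bps.append(a)
--         if i != k - 1:
--             bps.append(a + k)
--     cur = bps[-1] if bps else 0
--     hole = []
--     prev = 0
--     for b in bps:
--         hole.extend(range(prev + 1, b))
--         prev = b
--     step = set(bps)
--     if (cur - len(hole)) * len(step) > limit_e:
--         return None
--     return cur, step, hole
-- ===== Notes on version B (the rewrite author's own statement) =====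
-- stated objective: alternative
-- what changed: B computes each breakpoint by the closed form t(i)+(i-1)k (triangular number) instead of threading a running cur accumulator, takes cur as the last breakpoint, and emits the holes as the integer ranges between consecutive breakpoints instead of A's per-integer scan of [1, cur) with a set-membership test.
import Mathlib
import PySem

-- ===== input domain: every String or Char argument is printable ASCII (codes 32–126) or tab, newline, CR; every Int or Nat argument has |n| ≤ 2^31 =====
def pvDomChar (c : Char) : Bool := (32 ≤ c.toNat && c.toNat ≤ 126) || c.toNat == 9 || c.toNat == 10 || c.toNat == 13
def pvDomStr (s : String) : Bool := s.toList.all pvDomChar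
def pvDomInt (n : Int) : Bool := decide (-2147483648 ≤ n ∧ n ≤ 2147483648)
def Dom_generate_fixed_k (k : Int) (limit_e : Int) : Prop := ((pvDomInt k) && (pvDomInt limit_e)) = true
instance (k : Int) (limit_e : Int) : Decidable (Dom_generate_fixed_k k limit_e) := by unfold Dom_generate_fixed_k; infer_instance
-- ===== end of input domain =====

-- B computes each breakpoint by the closed form t(i)+(i-1)k instead of threading a running
-- accumulator, takes cur as the last breakpoint, and emits the holes as the ranges between
-- consecutive breakpoints instead of A's per-integer scan of [1, cur) against the set.

-- ===== PORT A =====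
def generate_fixed_k (k : Int) (limit_e : Int) : Option (Int × List Int × List Int) :=
  let st := (PySem.List.pyRange 1 k).foldl
    (fun (s : PySem.Set Int × Int) i =>
      let cur := s.2 + i
      let step := PySem.Set.add s.1 cur
      let cur := if i ≠ k - 1 then cur + k else cur
      (PySem.Set.add step cur, cur))
    (PySem.Set.empty, 0)
  let step := st.1
  let cur := st.2
  let hole := (PySem.List.pyRange 1 cur).foldl
    (fun acc i => if !(PySem.Set.contains step i) then acc ++ [i] else acc) []
  if (cur - (hole.length : Int)) * (step.length : Int) > limit_e then none
  else some (cur, step, hole)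

-- ===== PORT B =====
def generate_fixed_k_alt (k : Int) (limit_e : Int) : Option (Int × List Int × List Int) :=
  let bps := (PySem.List.pyRange 1 k).foldl
    (fun (acc : List Int) i =>
      let a := PySem.Int.floordiv (i * (i + 1)) 2 + (i - 1) * k
      let acc := acc ++ [a]
      if i ≠ k - 1 then acc ++ [a + k] else acc) []
  let cur := match PySem.List.pyGet? bps (-1) with
    | some b => b
    | none => 0
  let hole := (bps.foldl
    (fun (h : List Int × Int) b => (h.1 ++ PySem.List.pyRange (h.2 + 1) b, b))
    (([] : List Int), 0)).1
  let step := PySem.Set.ofList bps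
  if (cur - (hole.length : Int)) * (step.length : Int) > limit_e then none
  else some (cur, step, hole)

-- ===== PRECONDITION & SPEC =====
def Spec_generate_fixed_k (k : Int) (limit_e : Int) (out : Option (Int × List Int × List Int)) : Prop := out = generate_fixed_k_alt k limit_e
instance (k : Int) (limit_e : Int) (out : Option (Int × List Int × List Int)) : Decidable (Spec_generate_fixed_k k limit_e out) := by unfold Spec_generate_fixed_k; infer_instance

-- ===== CLAIM (what is proved, stated in full; the proofs are below) =====
def Claim_equal_generate_fixed_k : Prop := ∀ (k : Int) (limit_e : Int), Dom_generate_fixed_k k limit_e → Spec_generate_fixed_k k limit_e (generate_fixed_k k limit_e)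

-- ===== LEMMAS AND PROOFS =====

-- the gaps between consecutive breakpoints, the common hole structure
def pvGaps (prev : Int) (l : List Int) : List Int :=
  match l with
  | [] => []
  | b :: t => PySem.List.pyRange (prev + 1) b ++ pvGaps b t

-- loop-state invariant of A's generation loop: 0 :: bps is strictly increasing and ends at cur
def pvGood (bps : List Int) (cur : Int) : Prop :=
  List.IsChain (· < ·) ((0 : Int) :: bps) ∧ ((0 : Int) :: bps).getLast (by simp) = cur

theorem pvSet_add_idem (s : PySem.Set Int) (x : Int) :
    PySem.Set.add (PySem.Set.add s x) x = PySem.Set.add s x := by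
  simp only [PySem.Set.add, PySem.Set.contains]
  by_cases h : x ∈ s <;> simp [h]

theorem pvOfList_concat (l : List Int) (x : Int) :
    PySem.Set.ofList (l ++ [x]) = PySem.Set.add (PySem.Set.ofList l) x := by
  simp [PySem.Set.ofList_eq_foldl, List.foldl_append]

-- A's generation loop tracked against an explicit breakpoint list threading the same cur
theorem pvFold_rel (k : Int) (l : List Int) : ∀ (bps : List Int) (cur : Int),
    l.foldl (fun (s : PySem.Set Int × Int) i =>
        let cur := s.2 + i
        let step := PySem.Set.add s.1 cur
        let cur := if i ≠ k - 1 then cur + k else cur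
        (PySem.Set.add step cur, cur)) (PySem.Set.ofList bps, cur)
      = (PySem.Set.ofList ((l.foldl (fun (s : List Int × Int) i =>
            let cur := s.2 + i
            let bps := s.1 ++ [cur]
            if i ≠ k - 1 then (bps ++ [cur + k], cur + k) else (bps, cur)) (bps, cur)).1),
         (l.foldl (fun (s : List Int × Int) i =>
            let cur := s.2 + i
            let bps := s.1 ++ [cur]
            if i ≠ k - 1 then (bps ++ [cur + k], cur + k) else (bps, cur)) (bps, cur)).2) := by
  induction l with
  | nil => intro bps cur; rfl
  | cons i t ih =>
    intro bps cur
    simp only [List.foldl_cons]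
    by_cases h : i ≠ k - 1
    · simp only [if_pos h]
      rw [show bps ++ [cur + i] ++ [cur + i + k] = bps ++ [cur + i, cur + i + k] by simp]
      rw [← ih (bps ++ [cur + i, cur + i + k]) (cur + i + k)]
      congr 1
      rw [show bps ++ [cur + i, cur + i + k] = (bps ++ [cur + i]) ++ [cur + i + k] by simp]
      rw [pvOfList_concat, pvOfList_concat]
    · simp only [if_neg h]
      rw [← ih (bps ++ [cur + i]) (cur + i)]
      congr 1
      rw [pvOfList_concat, pvSet_add_idem]

theorem pvGood_snoc {bps : List Int} {cur y : Int} (h : pvGood bps cur) (hy : cur < y) :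
    pvGood (bps ++ [y]) y := by
  have hcast : (0 : Int) :: (bps ++ [y]) = ((0 : Int) :: bps) ++ [y] := by simp
  constructor
  · rw [hcast]
    apply h.1.append (by simp)
    intro a ha z hz
    simp only [List.head?_cons, Option.mem_def, Option.some.injEq] at hz
    have ha' : a = ((0 : Int) :: bps).getLast (by simp) := by
      rw [List.getLast?_eq_some_getLast (by simp)] at ha
      simpa using ha.symm
    subst hz
    rw [ha', h.2]
    exact hy
  · simp

theorem pvFold_inv (k : Int) (l : List Int) (hl : ∀ i ∈ l, 1 ≤ i ∧ i < k) :
    ∀ (bps : List Int) (cur : Int), pvGood bps cur →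
    pvGood ((l.foldl (fun (s : List Int × Int) i =>
        let cur := s.2 + i
        let bps := s.1 ++ [cur]
        if i ≠ k - 1 then (bps ++ [cur + k], cur + k) else (bps, cur)) (bps, cur)).1)
      ((l.foldl (fun (s : List Int × Int) i =>
        let cur := s.2 + i
        let bps := s.1 ++ [cur]
        if i ≠ k - 1 then (bps ++ [cur + k], cur + k) else (bps, cur)) (bps, cur)).2) := by
  induction l with
  | nil => intro bps cur h; exact h
  | cons i t ih =>
    intro bps cur h
    have hi : 1 ≤ i ∧ i < k := hl i (by simp)
    have ht : ∀ j ∈ t, 1 ≤ j ∧ j < k := fun j hj => hl j (by simp [hj])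
    simp only [List.foldl_cons]
    by_cases hb : i ≠ k - 1
    · simp only [if_pos hb]
      rw [show bps ++ [cur + i] ++ [cur + i + k] = (bps ++ [cur + i]) ++ [cur + i + k] by simp]
      exact ih ht _ _ (pvGood_snoc (pvGood_snoc h (by omega)) (by omega))
    · simp only [if_neg hb]
      exact ih ht _ _ (pvGood_snoc h (by omega))

theorem pvGapsFold (l : List Int) : ∀ (acc : List Int) (prev : Int),
    l.foldl (fun (h : List Int × Int) b => (h.1 ++ PySem.List.pyRange (h.2 + 1) b, b)) (acc, prev)
      = (acc ++ pvGaps prev l, (prev :: l).getLast (by simp)) := by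
  induction l with
  | nil => intro acc prev; simp [pvGaps]
  | cons b t ih =>
    intro acc prev
    simp only [List.foldl_cons]
    rw [ih]
    simp [pvGaps, List.getLast_cons]

theorem pvChain_head_le_last : ∀ (l : List Int) (a : Int),
    List.IsChain (· < ·) (a :: l) → a ≤ (a :: l).getLast (by simp) := by
  intro l
  induction l with
  | nil => intro a _; simp
  | cons b t ih =>
    intro a hc
    rw [List.getLast_cons (by simp)]
    have h2 := List.isChain_cons.mp hc
    have hab : a < b := h2.1 b rfl
    have := ih b h2.2
    omega

theorem pvChain_lt_mem (t : List Int) (b : Int)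
    (hc : List.IsChain (· < ·) (b :: t)) : ∀ x ∈ t, b < x := by
  have hp : List.Pairwise (· < ·) (b :: t) := hc.pairwise
  exact fun x hx => (List.pairwise_cons.mp hp).1 x hx

theorem pvFilter_eq_gaps : ∀ (l : List Int) (prev : Int), List.IsChain (· < ·) (prev :: l) →
    (PySem.List.pyRange (prev + 1) ((prev :: l).getLast (by simp))).filter
        (fun i => !(decide (i ∈ l))) = pvGaps prev l := by
  intro l
  induction l with
  | nil =>
    intro prev _
    have hnil : PySem.List.pyRange (prev + 1) prev = [] := by
      simp [PySem.List.pyRange]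
    simp [pvGaps, hnil]
  | cons b t ih =>
    intro prev hc
    have h2 := List.isChain_cons.mp hc
    have hpb : prev < b := h2.1 b rfl
    have hct : List.IsChain (· < ·) (b :: t) := h2.2
    have hbc : b ≤ (b :: t).getLast (by simp) := pvChain_head_le_last t b hct
    have hmt : ∀ x ∈ t, b < x := pvChain_lt_mem t b hct
    rw [List.getLast_cons (by simp)]
    rw [PySem.List.pyRange_one_append (prev + 1) b _ (by omega) hbc]
    rw [List.filter_append]
    have h1 : (PySem.List.pyRange (prev + 1) b).filter (fun i => !(decide (i ∈ b :: t)))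
        = PySem.List.pyRange (prev + 1) b := by
      apply List.filter_eq_self.mpr
      intro x hx
      rw [PySem.List.mem_pyRange_one] at hx
      simp only [Bool.not_eq_eq_eq_not, Bool.not_true, decide_eq_false_iff_not]
      intro hmem
      rcases List.mem_cons.mp hmem with h | h
      · omega
      · exact absurd (hmt x h) (by omega)
    rw [h1]
    cases t with
    | nil =>
      have hnil : PySem.List.pyRange b ((b :: ([] : List Int)).getLast (by simp)) = [] := by
        simp [PySem.List.pyRange]
      rw [hnil]
      simp [pvGaps]
    | cons u s =>
      have hbu : b < u := pvChain_lt_mem (u :: s) b hct u (by simp)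
      have hlast : b < (b :: u :: s).getLast (by simp) := by
        have hm : (u :: s).getLast (by simp) ∈ u :: s := List.getLast_mem _
        have := pvChain_lt_mem (u :: s) b hct _ hm
        rw [List.getLast_cons (by simp)]
        omega
      rw [PySem.List.pyRange_one_cons hlast]
      rw [List.filter_cons_of_neg (by simp)]
      have hcg : (PySem.List.pyRange (b + 1) ((b :: u :: s).getLast (by simp))).filter
            (fun i => !(decide (i ∈ b :: u :: s)))
          = (PySem.List.pyRange (b + 1) ((b :: u :: s).getLast (by simp))).filter
            (fun i => !(decide (i ∈ u :: s))) := by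
        apply List.filter_congr
        intro x hx
        rw [PySem.List.mem_pyRange_one] at hx
        have hxb : x ≠ b := by omega
        simp [hxb]
      rw [hcg]
      rw [ih b hct]
      simp [pvGaps]

-- triangular-number step: t(m) = t(m-1) + m, with Python floor division
theorem pvTriStep (m : Int) :
    PySem.Int.floordiv (m * (m + 1)) 2 = PySem.Int.floordiv ((m - 1) * m) 2 + m := by
  rw [PySem.Int.floordiv_eq_ediv_of_pos (by norm_num), PySem.Int.floordiv_eq_ediv_of_pos (by norm_num)]
  obtain ⟨r, hr⟩ := Int.even_mul_succ_self m
  have hsE : Even ((m - 1) * m) := by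
    have h := Int.even_mul_succ_self (m - 1)
    simpa using h
  obtain ⟨s, hs⟩ := hsE
  have h3 : m * (m + 1) = (m - 1) * m + 2 * m := by ring
  rw [hr, hs] at h3 ⊢
  omega

-- lockstep of B's closed-form breakpoint loop with the cur-threading loop, on the
-- prefix of the range where the "i ≠ k-1" branch is always taken
theorem pvLock (k : Int) (m : Int) (h1 : 1 ≤ m) (h2 : m ≤ k - 1) :
    ((PySem.List.pyRange 1 m).foldl
        (fun (acc : List Int) i =>
          let a := PySem.Int.floordiv (i * (i + 1)) 2 + (i - 1) * k
          let acc := acc ++ [a]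
          if i ≠ k - 1 then acc ++ [a + k] else acc) []
      = ((PySem.List.pyRange 1 m).foldl
          (fun (s : List Int × Int) i =>
            let cur := s.2 + i
            let bps := s.1 ++ [cur]
            if i ≠ k - 1 then (bps ++ [cur + k], cur + k) else (bps, cur)) ([], 0)).1)
    ∧ ((PySem.List.pyRange 1 m).foldl
          (fun (s : List Int × Int) i =>
            let cur := s.2 + i
            let bps := s.1 ++ [cur]
            if i ≠ k - 1 then (bps ++ [cur + k], cur + k) else (bps, cur)) ([], 0)).2
      = PySem.Int.floordiv ((m - 1) * m) 2 + (m - 1) * k := by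
  induction m, h1 using Int.le_induction with
  | base =>
    have h0 : PySem.List.pyRange 1 1 = [] := PySem.List.pyRange_one_eq_nil (le_refl 1)
    rw [h0]
    constructor
    · rfl
    · norm_num
  | succ m hm ih =>
    obtain ⟨ih1, ih2⟩ := ih (by omega)
    have hsp : PySem.List.pyRange 1 (m + 1) = PySem.List.pyRange 1 m ++ [m] :=
      PySem.List.pyRange_one_succ_right (by omega)
    have hne : m ≠ k - 1 := by omega
    rw [hsp]
    simp only [List.foldl_append, List.foldl_cons, List.foldl_nil, if_pos hne]
    have ha : PySem.Int.floordiv (m * (m + 1)) 2 + (m - 1) * k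
        = ((PySem.List.pyRange 1 m).foldl
            (fun (s : List Int × Int) i =>
              let cur := s.2 + i
              let bps := s.1 ++ [cur]
              if i ≠ k - 1 then (bps ++ [cur + k], cur + k) else (bps, cur)) ([], 0)).2 + m := by
      rw [pvTriStep m, ih2]; ring
    constructor
    · rw [ih1, ha]
    · rw [show (m + 1 - 1 : Int) = m from by ring, pvTriStep m, ih2]
      ring

-- ===== VERDICT (by name: the statement is the Claim_ definition above) =====
theorem generate_fixed_k_spec : Claim_equal_generate_fixed_k := by
  intro k limit_e _
  show generate_fixed_k k limit_e = generate_fixed_k_alt k limit_e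
  by_cases hk : 2 ≤ k
  · unfold generate_fixed_k generate_fixed_k_alt
    have hsp : PySem.List.pyRange 1 k = PySem.List.pyRange 1 (k - 1) ++ [k - 1] := by
      have h := PySem.List.pyRange_one_succ_right (a := 1) (b := k - 1) (by omega)
      rw [show (k - 1 + 1 : Int) = k from by ring] at h
      exact h
    obtain ⟨hl1, hl2⟩ := pvLock k (k - 1) (by omega) (le_refl _)
    have hkk : ¬(k - 1 ≠ k - 1) := by simp
    set P := (PySem.List.pyRange 1 (k - 1)).foldl
        (fun (s : List Int × Int) i =>
          let cur := s.2 + i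
          let bps := s.1 ++ [cur]
          if i ≠ k - 1 then (bps ++ [cur + k], cur + k) else (bps, cur)) ([], 0) with hP
    set c : Int := P.2 + (k - 1) with hc
    have hOld : (PySem.List.pyRange 1 k).foldl
        (fun (s : List Int × Int) i =>
          let cur := s.2 + i
          let bps := s.1 ++ [cur]
          if i ≠ k - 1 then (bps ++ [cur + k], cur + k) else (bps, cur)) ([], 0)
        = (P.1 ++ [c], c) := by
      rw [hsp]
      simp only [List.foldl_append, List.foldl_cons, List.foldl_nil, if_neg hkk]
      rw [← hP, ← hc]
    have ha : PySem.Int.floordiv ((k - 1) * (k - 1 + 1)) 2 + (k - 1 - 1) * k = c := by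
      rw [hc, pvTriStep (k - 1), hl2]; ring
    have hB : (PySem.List.pyRange 1 k).foldl
        (fun (acc : List Int) i =>
          let a := PySem.Int.floordiv (i * (i + 1)) 2 + (i - 1) * k
          let acc := acc ++ [a]
          if i ≠ k - 1 then acc ++ [a + k] else acc) []
        = P.1 ++ [c] := by
      rw [hsp]
      simp only [List.foldl_append, List.foldl_cons, List.foldl_nil, if_neg hkk]
      rw [hl1, ha]
    have hl : ∀ i ∈ PySem.List.pyRange 1 k, 1 ≤ i ∧ i < k := fun i hi =>
      PySem.List.mem_pyRange_one.mp hi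
    have hrel := pvFold_rel k (PySem.List.pyRange 1 k) [] 0
    have hgood := pvFold_inv k (PySem.List.pyRange 1 k) hl [] 0 ⟨by simp, rfl⟩
    rw [hOld] at hrel hgood
    rw [show (PySem.Set.empty : PySem.Set Int) = PySem.Set.ofList ([] : List Int) from rfl]
    rw [hrel, hB]
    dsimp only
    rw [PySem.List.pyGet?_neg_one_append_singleton]
    dsimp only
    obtain ⟨hch, hlast⟩ := hgood
    -- A's hole loop is a filter of the integer range against the set
    rw [PySem.List.foldl_append_if_eq_filter
      (fun i => !(PySem.Set.contains (PySem.Set.ofList (P.1 ++ [c])) i))]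
    -- B's hole loop is the gap walk between consecutive breakpoints
    rw [pvGapsFold (P.1 ++ [c]) [] 0]
    have hpred : (PySem.List.pyRange 1 c).filter
          (fun i => !(PySem.Set.contains (PySem.Set.ofList (P.1 ++ [c])) i))
        = (PySem.List.pyRange 1 c).filter (fun i => !(decide (i ∈ P.1 ++ [c]))) := by
      apply List.filter_congr
      intro x _
      simp [PySem.Set.contains, PySem.Set.mem_ofList]
    rw [hpred]
    have hfilter := pvFilter_eq_gaps (P.1 ++ [c]) 0 hch
    rw [hlast] at hfilter
    rw [show (0 : Int) + 1 = 1 from rfl] at hfilter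
    rw [hfilter]
  · have hnil : PySem.List.pyRange 1 k = [] := PySem.List.pyRange_one_eq_nil (by omega)
    unfold generate_fixed_k generate_fixed_k_alt
    rw [hnil]
    rfl
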